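-- pv_equiv track=rewrite | github.com/ss87021456/Subword-Entity-Typing | src/utils.py | multi_mentions
-- ===== SOURCE A (Python) =====
-- def multi_mentions(name):
--     """
--
--     Argument:
--         name(str):
--
--     Return:
--         synonym(list of str): List of all synonyms.
--     """
--     synonym = None
--     # A, B, or C
--     if ", or " in name:
--         parsed = name.replace(" or", "")
--         synonym = parsed.split(", ")
--     # A or B
--     elif " or " in name:
--         synonym = name.split(" or ")
--     # A, B -> A, BA
--     # A, B, C -> A, BA, CBA
--     elif ", " in name:
--         parsed = name.split(", ")
--         synonym = [" ".join(reversed(parsed[: i + 1]))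
--                    for i in range(len(parsed))]
--     # normal (no synonyms)
--     else:
--         synonym = [name]
--
--     return synonym
-- ===== SOURCE B (Python) =====
-- def multi_mentions(name):
--     if ", or " in name:
--         return name.replace(" or", "").split(", ")
--     if " or " in name:
--         return name.split(" or ")
--     if ", " in name:
--         out = []
--         for t in name.split(", "):
--             out.append(t if not out else t + " " + out[-1])
--         return out
--     return [name]
-- ===== Notes on version B (the rewrite author's own statement) =====
-- stated objective: alternative
-- what changed: The comma-separated branch builds each synonym incrementally from the previous one in a single accumulator pass instead of slice-reverse-join per index; the other branches are the same library calls.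
import Mathlib
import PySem

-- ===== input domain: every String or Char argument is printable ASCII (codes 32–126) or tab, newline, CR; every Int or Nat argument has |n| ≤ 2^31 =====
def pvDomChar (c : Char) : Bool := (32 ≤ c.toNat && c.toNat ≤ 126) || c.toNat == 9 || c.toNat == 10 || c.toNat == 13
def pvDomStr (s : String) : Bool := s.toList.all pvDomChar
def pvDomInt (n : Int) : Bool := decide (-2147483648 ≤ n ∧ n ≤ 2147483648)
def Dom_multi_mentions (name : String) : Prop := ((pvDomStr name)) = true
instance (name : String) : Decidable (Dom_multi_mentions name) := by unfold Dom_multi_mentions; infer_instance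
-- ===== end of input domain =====

-- B rewrites only the comma-split branch: one left-to-right pass with a running accumulator
-- (each synonym built from the previous one) instead of per-index slice-reverse-join; objective: alternative.

-- ===== PORT A =====
-- the separators ", " and " or " are nonempty literals, so split? is never none; .getD [] is exact
def multi_mentions (name : String) : List String :=
  if PySem.Str.isIn ", or " name then
    let parsed := PySem.Str.replace name " or" ""
    (PySem.Str.split? parsed ", ").getD []
  else if PySem.Str.isIn " or " name then
    (PySem.Str.split? name " or ").getD []
  else if PySem.Str.isIn ", " name then
    let parsed := (PySem.Str.split? name ", ").getD []
    (PySem.List.pyRange 0 (parsed.length : Int) 1).map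
      (fun i => PySem.Str.join " " (PySem.List.slice parsed none (some (i + 1))).reverse)
  else [name]

-- ===== PORT B =====
def multi_mentions_alt (name : String) : List String :=
  if PySem.Str.isIn ", or " name then
    (PySem.Str.split? (PySem.Str.replace name " or" "") ", ").getD []
  else if PySem.Str.isIn " or " name then
    (PySem.Str.split? name " or ").getD []
  else if PySem.Str.isIn ", " name then
    ((PySem.Str.split? name ", ").getD []).foldl
      (fun out t =>
        out ++ [if out.isEmpty then t else t ++ " " ++ PySem.List.pyGetD out (-1) ""]) []
  else [name]

-- ===== PRECONDITION & SPEC =====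
def Spec_multi_mentions (name : String) (out : List String) : Prop := out = multi_mentions_alt name
instance (name : String) (out : List String) : Decidable (Spec_multi_mentions name out) := by unfold Spec_multi_mentions; infer_instance

-- ===== CLAIM (what is proved, stated in full; the proofs are below) =====
def Claim_equal_multi_mentions : Prop := ∀ (name : String), Dom_multi_mentions name → Spec_multi_mentions name (multi_mentions name)

-- ===== LEMMAS AND PROOFS =====

-- the cumulative chain built by B's loop after its first element
def pvChain (prev : String) : List String → List String
  | [] => []
  | t :: ts => (t ++ " " ++ prev) :: pvChain (t ++ " " ++ prev) ts

-- " ".join [a, b] is a ++ " " ++ b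
theorem pvJoin2 (a b : String) : PySem.Str.join " " [a, b] = a ++ " " ++ b := by
  apply String.toList_inj.mp
  simp [PySem.Str.toList_join, PySem.Chars.join_cons_cons, PySem.Chars.join_singleton]

theorem pvJoin1 (a : String) : PySem.Str.join " " [a] = a := by
  apply String.toList_inj.mp
  simp [PySem.Str.toList_join, PySem.Chars.join_singleton]

-- absorbing a glued last element into the join (List Char level)
theorem pvJoinAbsorbC (xs : List (List Char)) (a b : List Char) :
    PySem.Chars.join [' '] (xs ++ [a ++ ' ' :: b]) = PySem.Chars.join [' '] (xs ++ [a, b]) := by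
  induction xs with
  | nil =>
      simp [PySem.Chars.join_singleton, PySem.Chars.join_cons_cons]
  | cons x xs ih =>
      cases xs with
      | nil =>
          simp [PySem.Chars.join_singleton, PySem.Chars.join_cons_cons]
      | cons y ys =>
          simp only [List.cons_append, PySem.Chars.join_cons_cons] at ih ⊢
          simp [ih]

-- absorbing a glued last element into the join
theorem pvJoinAbsorb (xs : List String) (a b : String) :
    PySem.Str.join " " (xs ++ [a ++ " " ++ b]) = PySem.Str.join " " (xs ++ [a, b]) := by
  apply String.toList_inj.mp
  simp only [PySem.Str.toList_join, List.map_append, List.map_cons, List.map_nil,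
    String.toList_append]
  have := pvJoinAbsorbC (xs.map String.toList) a.toList b.toList
  simpa using this

-- B's loop from a nonempty accumulator appends the chain started at the accumulator's last element
theorem pvFoldl_acc :
    ∀ (ts acc : List String) (h : acc ≠ []),
      List.foldl (fun out t =>
          out ++ [if out.isEmpty then t else t ++ " " ++ PySem.List.pyGetD out (-1) ""]) acc ts
        = acc ++ pvChain (acc.getLast h) ts := by
  intro ts
  induction ts with
  | nil => intro acc h; simp [pvChain]
  | cons t ts ih =>
      intro acc h
      have hne : acc.isEmpty = false := by simpa [List.isEmpty_iff] using h
      have hlast : PySem.List.pyGetD acc (-1) "" = acc.getLast h :=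
        PySem.List.pyGetD_neg_one acc "" h
      have h2 : acc ++ [t ++ " " ++ acc.getLast h] ≠ [] := by simp
      rw [List.foldl_cons]
      have hstep : acc ++ [if acc.isEmpty then t
          else t ++ " " ++ PySem.List.pyGetD acc (-1) ""] = acc ++ [t ++ " " ++ acc.getLast h] := by
        rw [hne, hlast]; simp
      rw [hstep, ih _ h2]
      simp [pvChain]

-- the chain is A's reversed-prefix joins, with the start element appended
theorem pvChain_eq : ∀ (ts : List String) (prev : String),
    pvChain prev ts = (List.range ts.length).map
      (fun k => PySem.Str.join " " ((ts.take (k+1)).reverse ++ [prev])) := by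
  intro ts
  induction ts with
  | nil => intro prev; simp [pvChain]
  | cons t ts ih =>
      intro prev
      rw [List.length_cons, List.range_succ_eq_map, List.map_cons, List.map_map]
      show pvChain prev (t :: ts) = _ :: _
      have h0 : PySem.Str.join " " (((t :: ts).take (0+1)).reverse ++ [prev])
          = t ++ " " ++ prev := by
        simp [pvJoin2]
      rw [h0]
      simp only [pvChain]
      congr 1
      rw [ih (t ++ " " ++ prev)]
      apply List.map_congr_left
      intro k _
      simp only [Function.comp, List.take_succ_cons, List.reverse_cons]
      rw [List.append_assoc]
      have h1 : ([t] : List String) ++ [prev] = [t, prev] := rfl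
      rw [h1, ← pvJoinAbsorb]

-- A's comprehension over the split tokens equals B's accumulator loop
theorem pvBranch3 (l : List String) :
    (PySem.List.pyRange 0 (l.length : Int) 1).map
      (fun i => PySem.Str.join " " (PySem.List.slice l none (some (i + 1))).reverse)
    = l.foldl (fun out t =>
        out ++ [if out.isEmpty then t else t ++ " " ++ PySem.List.pyGetD out (-1) ""]) [] := by
  have hA : (PySem.List.pyRange 0 (l.length : Int) 1).map
      (fun i => PySem.Str.join " " (PySem.List.slice l none (some (i + 1))).reverse)
      = (List.range l.length).map
        (fun k => PySem.Str.join " " ((l.take (k+1)).reverse)) := by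
    rw [PySem.List.pyRange_zero_nat, List.map_map]
    apply List.map_congr_left
    intro k _
    simp only [Function.comp]
    have h : ((k : Int) + 1) = ((k + 1 : Nat) : Int) := by push_cast; ring
    rw [h, PySem.List.slice_to_natCast]
  rw [hA]
  cases l with
  | nil => simp
  | cons t ts =>
      rw [List.foldl_cons]
      have hstep : ([] : List String) ++ [if ([] : List String).isEmpty then t
          else t ++ " " ++ PySem.List.pyGetD [] (-1) ""] = [t] := by simp
      rw [hstep, pvFoldl_acc ts [t] (by simp)]
      rw [List.length_cons, List.range_succ_eq_map, List.map_cons, List.map_map]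
      have h0 : PySem.Str.join " " (((t :: ts).take (0+1)).reverse) = t := by
        simp [pvJoin1]
      rw [h0]
      simp only [List.getLast_singleton, List.singleton_append]
      congr 1
      rw [pvChain_eq ts t]
      apply List.map_congr_left
      intro k _
      simp [Function.comp]

-- ===== VERDICT (by name: the statement is the Claim_ definition above) =====
theorem multi_mentions_spec : Claim_equal_multi_mentions := by
  intro name _
  unfold Spec_multi_mentions multi_mentions multi_mentions_alt
  split_ifs with h1 h2 h3
  · rfl
  · rfl
  · exact pvBranch3 _
  · rfl
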